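-- pv_equiv track=rewrite | github.com/jewettaij/moltemplate | moltemplate/genpoly_modify_lt.py | FindNearestAvailableSite
-- ===== SOURCE A (Python) =====
-- def FindNearestAvailableSite(i, # target index. look for a position closest to i
--                              width,  # number of needed consecutive vacant sites
--                              occupancy,     # an array of True,False values
--                              is_periodic):  # consider "wrap around" indexing?
--     """
--     Look for an interval containing "width" vacant sites in the occupancy array
--     (an array of True or False values) whose start is nearest to location i.
--     """
--     N = len(occupancy)
--     # Check and see if site i is available.  If not, skip to the next site,
--     # (either before or after this site).
--     if is_periodic:
--         j_stop = N // 2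
--     else:
--         j_stop = max(-width+N-i, i)
--     occupied = True
--     for j in range(0, j_stop):
--         occupied = True
--         for s in (-1, 1):
--             if i+s*j < 0:
--                 continue
--             if i+s*j >= N:
--                 continue
--             # Is location "i+s*j" available for an object of size "width"?
--             # If so, all sites from [i+s*j, i+s*j+width) must not be occupied.
--             occupied = False
--             for d in range(0, width):
--                 if not is_periodic:
--                     if i+s*j+d < 0:
--                         occupied = True
--                         continue
--                     if i+s*j+d >= N:
--                         occupied = True
--                         continue
--                 if occupancy[(i+s*j+d) % N]:
--                     occupied = True
--                     break
--             if not occupied: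
--                 break
--         if not occupied:
--             break
--     if occupied:
--         return -1
--     else:
--         return i+s*j
-- ===== SOURCE B (Python) =====
-- def FindNearestAvailableSite(i, width, occupancy, is_periodic):
--     """Same result as A, but each candidate interval is tested in O(1)
--     using a prefix-sum of the occupancy array (no inner width-long scan)."""
--     N = len(occupancy)
--     prefix = [0] * (N + 1)
--     for k, occ in enumerate(occupancy):
--         prefix[k + 1] = prefix[k] + (1 if occ else 0)
--
--     def vacant(start):  # start is known to lie in [0, N)
--         if width <= 0:
--             return True
--         if not is_periodic:
--             return start + width <= N and prefix[start + width] == prefix[start]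
--         if width >= N:
--             return prefix[N] == 0
--         end = start + width
--         if end <= N:
--             return prefix[end] == prefix[start]
--         return prefix[N] - prefix[start] + prefix[end - N] == 0
--
--     j_stop = N // 2 if is_periodic else max(N - width - i, i)
--     for j in range(j_stop):
--         for start in (i - j, i + j):
--             if 0 <= start < N and vacant(start):
--                 return start
--     return -1
-- ===== Notes on version B (the rewrite author's own statement) =====
-- stated objective: alternative
-- what changed: B precomputes a prefix-sum of the occupancy array once and tests each candidate interval (including the periodic wrap-around split) with prefix-sum lookups, eliminating A's inner width-long scan per candidate; the outward scan order (i-j before i+j) is unchanged.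
import Mathlib
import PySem

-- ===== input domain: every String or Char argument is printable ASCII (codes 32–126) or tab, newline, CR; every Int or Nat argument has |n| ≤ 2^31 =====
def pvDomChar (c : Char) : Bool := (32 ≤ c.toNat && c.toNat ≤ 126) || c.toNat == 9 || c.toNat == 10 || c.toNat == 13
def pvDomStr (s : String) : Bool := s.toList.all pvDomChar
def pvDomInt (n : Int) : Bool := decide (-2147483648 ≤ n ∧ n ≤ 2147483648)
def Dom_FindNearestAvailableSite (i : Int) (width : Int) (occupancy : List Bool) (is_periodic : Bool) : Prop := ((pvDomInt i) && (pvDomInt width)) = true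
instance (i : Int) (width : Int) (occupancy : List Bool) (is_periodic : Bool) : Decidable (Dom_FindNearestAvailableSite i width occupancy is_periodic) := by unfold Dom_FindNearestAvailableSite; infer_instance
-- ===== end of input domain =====

-- B tests each candidate interval in O(1) with a pfx-sum of the occupancy array
-- instead of A's inner width-long scan; same outward scan order, same results.

-- ===== PORT A =====
-- the inner "for d in range(0, width)" loop; `occupied` is the loop-carried flag
def pvA_dLoop (N start : Int) (occupancy : List Bool) (is_periodic : Bool)
    (ds : List Int) (occupied : Bool) : Bool :=
  match ds with
  | [] => occupied
  | d :: rest =>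
    if is_periodic = false ∧ start + d < 0 then
      pvA_dLoop N start occupancy is_periodic rest true
    else if is_periodic = false ∧ start + d ≥ N then
      pvA_dLoop N start occupancy is_periodic rest true
    else if PySem.List.pyGetD occupancy (PySem.Int.mod (start + d) N) false then
      true  -- break with occupied = True
    else
      pvA_dLoop N start occupancy is_periodic rest occupied

-- one iteration of the "for s in (-1, 1)" loop: final (occupied, s) after it
def pvA_sLoop (N i width : Int) (occupancy : List Bool) (is_periodic : Bool) (j : Int) : Bool × Int :=
  if i + (-1) * j < 0 ∨ i + (-1) * j ≥ N then
    -- s = -1 skipped by "continue"; occupied keeps the value True set at the top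
    if i + 1 * j < 0 ∨ i + 1 * j ≥ N then (true, 1)
    else (pvA_dLoop N (i + 1 * j) occupancy is_periodic (PySem.List.pyRange 0 width 1) false, 1)
  else
    let occupied := pvA_dLoop N (i + (-1) * j) occupancy is_periodic (PySem.List.pyRange 0 width 1) false
    if occupied = false then (false, -1)  -- break out of the s loop
    else if i + 1 * j < 0 ∨ i + 1 * j ≥ N then (true, 1)
    else (pvA_dLoop N (i + 1 * j) occupancy is_periodic (PySem.List.pyRange 0 width 1) false, 1)

-- the outer "for j in range(0, j_stop)" loop with its break / final return
def pvA_jLoop (N i width : Int) (occupancy : List Bool) (is_periodic : Bool)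
    (js : List Int) : Int :=
  match js with
  | [] => -1
  | j :: rest =>
    let r := pvA_sLoop N i width occupancy is_periodic j
    if r.1 = true then pvA_jLoop N i width occupancy is_periodic rest
    else i + r.2 * j

def FindNearestAvailableSite (i : Int) (width : Int) (occupancy : List Bool) (is_periodic : Bool) : Int :=
  let N : Int := occupancy.length
  let j_stop : Int := if is_periodic then PySem.Int.floordiv N 2 else max (-width + N - i) i
  pvA_jLoop N i width occupancy is_periodic (PySem.List.pyRange 0 j_stop 1)

-- ===== PORT B =====
-- pfx[k] = number of occupied sites among occupancy[0:k]
def pvB_prefix (occupancy : List Bool) : List Int :=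
  occupancy.foldl (fun p o => p ++ [(p.getLast?.getD 0) + (if o then 1 else 0)]) [0]

def pvB_get (p : List Int) (k : Int) : Int := PySem.List.pyGetD p k 0

-- "vacant(start)" of Source B: O(1) interval test via the pfx sums (start ∈ [0, N))
def pvB_vacant (N width : Int) (pfx : List Int) (is_periodic : Bool) (start : Int) : Bool :=
  if width ≤ 0 then true
  else if is_periodic = false then
    decide (start + width ≤ N) && decide (pvB_get pfx (start + width) = pvB_get pfx start)
  else if width ≥ N then decide (pvB_get pfx N = 0)
  else if start + width ≤ N then
    decide (pvB_get pfx (start + width) = pvB_get pfx start)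
  else
    decide (pvB_get pfx N - pvB_get pfx start + pvB_get pfx (start + width - N) = 0)

-- the "for j in range(j_stop): for start in (i-j, i+j)" loop of Source B
def pvB_jLoop (N i width : Int) (pfx : List Int) (is_periodic : Bool)
    (js : List Int) : Int :=
  match js with
  | [] => -1
  | j :: rest =>
    if 0 ≤ i - j ∧ i - j < N ∧ pvB_vacant N width pfx is_periodic (i - j) = true then i - j
    else if 0 ≤ i + j ∧ i + j < N ∧ pvB_vacant N width pfx is_periodic (i + j) = true then i + j
    else pvB_jLoop N i width pfx is_periodic rest

def FindNearestAvailableSite_alt (i : Int) (width : Int) (occupancy : List Bool) (is_periodic : Bool) : Int :=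
  let N : Int := occupancy.length
  let pfx := pvB_prefix occupancy
  let j_stop : Int := if is_periodic then PySem.Int.floordiv N 2 else max (N - width - i) i
  pvB_jLoop N i width pfx is_periodic (PySem.List.pyRange 0 j_stop 1)

-- ===== PRECONDITION & SPEC =====
def Spec_FindNearestAvailableSite (i : Int) (width : Int) (occupancy : List Bool) (is_periodic : Bool) (out : Int) : Prop := out = FindNearestAvailableSite_alt i width occupancy is_periodic
instance (i : Int) (width : Int) (occupancy : List Bool) (is_periodic : Bool) (out : Int) : Decidable (Spec_FindNearestAvailableSite i width occupancy is_periodic out) := by unfold Spec_FindNearestAvailableSite; infer_instance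

-- ===== CLAIM (what is proved, stated in full; the proofs are below) =====
def Claim_equal_FindNearestAvailableSite : Prop := ∀ (i : Int) (width : Int) (occupancy : List Bool) (is_periodic : Bool), Dom_FindNearestAvailableSite i width occupancy is_periodic → Spec_FindNearestAvailableSite i width occupancy is_periodic (FindNearestAvailableSite i width occupancy is_periodic)

-- ===== LEMMAS AND PROOFS =====

-- A's d-loop is `occupied || some d in the list is "bad"`
lemma pvA_dLoop_char (N start : Int) (occ : List Bool) (per : Bool) (ds : List Int) (occup : Bool) :
    pvA_dLoop N start occ per ds occup =
      (occup || ds.any (fun d =>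
        ((!per) && (decide (start + d < 0) || decide (N ≤ start + d)))
        || PySem.List.pyGetD occ (PySem.Int.mod (start + d) N) false)) := by
  induction ds generalizing occup with
  | nil => simp [pvA_dLoop]
  | cons d rest ih =>
    simp only [pvA_dLoop, List.any_cons]
    split_ifs with h1 h2 h3
    · rw [ih]
      obtain ⟨hp, hd⟩ := h1
      simp [hp, hd]
    · rw [ih]
      obtain ⟨hp, hd⟩ := h2
      simp [hp, hd, Bool.or_assoc]
    · simp [h3]
    · rw [ih]
      have hb : (((!per) && (decide (start + d < 0) || decide (N ≤ start + d)))
          || PySem.List.pyGetD occ (PySem.Int.mod (start + d) N) false) = false := by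
        simp only [Bool.or_eq_false_iff, Bool.and_eq_false_iff]
        constructor
        · by_cases hp : per = false
          · right
            have hd1 : ¬ (start + d < 0) := fun h => h1 ⟨hp, h⟩
            have hd2 : ¬ (N ≤ start + d) := fun h => h2 ⟨hp, h⟩
            simp [hd1, hd2]
          · left; simp_all
        · simpa using h3
      rw [hb]
      simp


-- the prefix list really is the list of prefix counts
lemma pvB_prefix_eq (occ : List Bool) :
    pvB_prefix occ = (List.range (occ.length + 1)).map (fun k => (((occ.take k).count true : Nat) : Int)) := by
  induction occ using List.reverseRecOn with
  | nil => simp [pvB_prefix]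
  | append_singleton occ o ih =>
    unfold pvB_prefix at ih ⊢
    rw [List.foldl_append]
    simp only [List.foldl_cons, List.foldl_nil]
    rw [ih]
    have hlen : (occ ++ [o]).length + 1 = (occ.length + 1) + 1 := by simp
    rw [hlen]
    conv_rhs => rw [List.range_succ, List.map_append]
    have hlast : ((List.range (occ.length + 1)).map
        (fun k => (((occ.take k).count true : Nat) : Int))).getLast?.getD 0
          = ((occ.count true : Nat) : Int) := by
      rw [List.range_succ, List.map_append]
      simp
    rw [hlast]
    congr 1
    · apply List.map_congr_left
      intro k hk
      have hk' : k ≤ occ.length := by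
        have := List.mem_range.mp hk; omega
      rw [List.take_append_of_le_length hk']
    · have htake : (occ ++ [o]).take (occ.length + 1) = occ ++ [o] := by
        apply List.take_of_length_le; simp
      simp only [List.map_cons, List.map_nil, htake]
      rw [List.count_append]
      push_cast
      cases o <;> simp


lemma pvB_get_prefix (occ : List Bool) (k : Int) (h0 : 0 ≤ k) (h1 : k ≤ (occ.length : Int)) :
    pvB_get (pvB_prefix occ) k = (((occ.take k.toNat).count true : Nat) : Int) := by
  rw [pvB_prefix_eq]
  unfold pvB_get
  rw [PySem.List.pyGetD_eq_getElem _ 0 h0 (by simp; omega)]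
  simp


-- prefix counts agree on a ≤ b iff the segment [a, b) is all-false
lemma pvSeg_iff (occ : List Bool) (a b : Nat) (hab : a ≤ b) (hb : b ≤ occ.length) :
    ((occ.take b).count true = (occ.take a).count true) ↔
      (∀ k, a ≤ k → k < b → ∀ (h : k < occ.length), occ[k] = false) := by
  have hsplit : occ.take b = occ.take a ++ (occ.drop a).take (b - a) := by
    conv_lhs => rw [show b = a + (b - a) by omega]
    rw [List.take_add]
  rw [hsplit, List.count_append]
  have hlen : ((occ.drop a).take (b - a)).length = b - a := by
    simp; omega
  constructor
  · intro h k hk1 hk2 hk3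
    have hz : ((occ.drop a).take (b - a)).count true = 0 := by omega
    rw [List.count_eq_zero] at hz
    by_contra hocc
    apply hz
    have hidx : k - a < ((occ.drop a).take (b - a)).length := by omega
    have : ((occ.drop a).take (b - a))[k - a]'hidx = occ[k]'hk3 := by
      rw [List.getElem_take, List.getElem_drop]
      congr 1; omega
    have hmem := List.getElem_mem hidx
    rw [this] at hmem
    simp only [Bool.not_eq_false] at hocc
    rwa [hocc] at hmem
  · intro h
    have hz : ((occ.drop a).take (b - a)).count true = 0 := by
      rw [List.count_eq_zero]
      intro hmem
      obtain ⟨idx, hidx, hval⟩ := List.mem_iff_getElem.mp hmem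
      rw [List.getElem_take, List.getElem_drop] at hval
      have : occ[a + idx]'(by omega) = false := h (a + idx) (by omega) (by omega) _
      rw [this] at hval
      exact Bool.false_ne_true hval
    omega


-- prefix counts differ on a ≤ b iff some site in [a, b) is occupied
lemma pvSeg_ne_iff (occ : List Bool) (a b : Nat) (hab : a ≤ b) (hb : b ≤ occ.length) :
    (¬ ((occ.take b).count true = (occ.take a).count true)) ↔
      (∃ k, a ≤ k ∧ k < b ∧ ∃ (h : k < occ.length), occ[k] = true) := by
  rw [pvSeg_iff occ a b hab hb]
  push_neg
  constructor
  · rintro ⟨k, hk1, hk2, h, hv⟩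
    exact ⟨k, hk1, hk2, h, by simpa using hv⟩
  · rintro ⟨k, hk1, hk2, h, hv⟩
    exact ⟨k, hk1, hk2, h, by simp [hv]⟩


-- core: A's d-loop fails exactly when B's vacancy test succeeds (start in range)
lemma pvCore (occ : List Bool) (per : Bool) (width start : Int)
    (h0 : 0 ≤ start) (h1 : start < (occ.length : Int)) :
    pvA_dLoop (occ.length) start occ per (PySem.List.pyRange 0 width 1) false
      = !(pvB_vacant (occ.length) width (pvB_prefix occ) per start) := by
  have hN : (0:Int) < (occ.length : Int) := lt_of_le_of_lt h0 h1
  have hn : 0 < occ.length := by exact_mod_cast hN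
  rw [pvA_dLoop_char]
  simp only [Bool.false_or]
  by_cases hw : width ≤ 0
  · rw [PySem.List.pyRange_one_eq_nil (by omega)]
    simp [pvB_vacant, hw]
  push_neg at hw
  -- index helpers
  have hmod_id : ∀ x : Int, 0 ≤ x → x < (occ.length : Int) → PySem.Int.mod x (occ.length) = x := by
    intro x hx1 hx2
    rw [PySem.Int.mod_eq_emod_of_pos hN]
    exact Int.emod_eq_of_lt hx1 hx2
  have hget : ∀ (x : Int) (hx1 : 0 ≤ x) (hx2 : x < (occ.length : Int)),
      PySem.List.pyGetD occ x false = occ[x.toNat]'(by omega) :=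
    fun x hx1 hx2 => PySem.List.pyGetD_eq_getElem occ false hx1 hx2
  have hmod_wrap : ∀ x : Int, (occ.length : Int) ≤ x → x < 2 * (occ.length : Int) →
      PySem.Int.mod x (occ.length) = x - (occ.length : Int) := by
    intro x hx1 hx2
    rw [PySem.Int.mod_eq_emod_of_pos hN, ← Int.sub_emod_right x (occ.length : Int)]
    exact Int.emod_eq_of_lt (by omega) (by omega)
  rw [Bool.eq_iff_iff, Bool.not_eq_true', List.any_eq_true]
  unfold pvB_vacant
  rw [if_neg (by omega)]
  by_cases hper : per = false
  · -- ========== non-periodic ==========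
    rw [if_pos hper]
    subst hper
    by_cases hbig : (occ.length : Int) < start + width
    · -- interval sticks out: A finds a bad d, B's vacant is false
      constructor
      · intro _
        simp [show ¬ (start + width ≤ (occ.length : Int)) by omega]
      · intro _
        refine ⟨(occ.length : Int) - start, ?_, ?_⟩
        · rw [PySem.List.mem_pyRange_one]; omega
        · simp only [Bool.not_false, Bool.true_and, Bool.or_eq_true, decide_eq_true_eq]
          left; right; omega
    · -- interval inside [0, N): compare with the two prefix sums
      push_neg at hbig
      rw [pvB_get_prefix occ (start + width) (by omega) (by omega),
          pvB_get_prefix occ start (by omega) (by omega)]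
      have hcast : ((((occ.take (start + width).toNat).count true : Nat) : Int)
            = (((occ.take start.toNat).count true : Nat) : Int))
          ↔ ((occ.take (start + width).toNat).count true = (occ.take start.toNat).count true) := by
        exact Int.natCast_inj
      constructor
      · rintro ⟨d, hdmem, hbad⟩
        rw [PySem.List.mem_pyRange_one] at hdmem
        have hin : 0 ≤ start + d ∧ start + d < (occ.length : Int) := by
          constructor <;> omega
        rw [hmod_id _ hin.1 hin.2, hget _ hin.1 hin.2] at hbad
        simp only [Bool.not_false, Bool.true_and, Bool.or_eq_true, decide_eq_true_eq] at hbad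
        rcases hbad with (h' | h') | hocc
        · omega
        · omega
        · simp only [show (start + width ≤ (occ.length : Int)) by omega, decide_true,
            Bool.true_and, decide_eq_false_iff_not]
          rw [hcast, pvSeg_ne_iff occ start.toNat (start + width).toNat (by omega) (by omega)]
          exact ⟨(start + d).toNat, by omega, by omega, by omega, hocc⟩
      · intro hvf
        simp only [Bool.and_eq_false_iff, decide_eq_false_iff_not] at hvf
        rcases hvf with h' | h'
        · omega
        · rw [hcast, pvSeg_ne_iff occ start.toNat (start + width).toNat (by omega) (by omega)] at h'
          obtain ⟨k, hk1, hk2, hk3, hkv⟩ := h'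
          refine ⟨(k : Int) - start, ?_, ?_⟩
          · rw [PySem.List.mem_pyRange_one]; omega
          · have hin : 0 ≤ start + ((k:Int) - start) ∧ start + ((k:Int) - start) < (occ.length : Int) := by
              constructor <;> omega
            rw [hmod_id _ hin.1 hin.2, hget _ hin.1 hin.2]
            simp only [Bool.or_eq_true]
            right
            simp [hkv]
  · -- ========== periodic ==========
    rw [if_neg hper]
    have hper' : per = true := by cases per <;> simp_all
    subst hper'
    have hbadsimp : ∀ d : Int,
        (((!true) && (decide (start + d < 0) || decide ((occ.length:Int) ≤ start + d)))
          || PySem.List.pyGetD occ (PySem.Int.mod (start + d) (occ.length)) false)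
        = PySem.List.pyGetD occ (PySem.Int.mod (start + d) (occ.length)) false := by
      intro d; simp
    by_cases hWN : width ≥ (occ.length : Int)
    · -- width covers every residue: vacant iff the whole ring is free
      rw [if_pos hWN]
      rw [pvB_get_prefix occ (occ.length) (by omega) (by omega)]
      have htk : occ.take ((occ.length : Int)).toNat = occ := by
        simp
      rw [htk]
      constructor
      · rintro ⟨d, hdmem, hbad⟩
        rw [PySem.List.mem_pyRange_one] at hdmem
        rw [hbadsimp] at hbad
        have hm1 : 0 ≤ PySem.Int.mod (start + d) (occ.length) := PySem.Int.mod_nonneg _ hN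
        have hm2 : PySem.Int.mod (start + d) (occ.length) < (occ.length : Int) := PySem.Int.mod_lt _ hN
        rw [hget _ hm1 hm2] at hbad
        simp only [decide_eq_false_iff_not]
        intro hzero
        have : occ.count true = 0 := by exact_mod_cast hzero
        rw [List.count_eq_zero] at this
        exact this (by rw [← hbad]; exact List.getElem_mem _)
      · intro hvf
        simp only [decide_eq_false_iff_not] at hvf
        have hcnt : occ.count true ≠ 0 := by
          intro h'; exact hvf (by exact_mod_cast h')
        have hmem : true ∈ occ := by
          by_contra hmem
          exact hcnt (List.count_eq_zero.mpr hmem)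
        obtain ⟨r, hr, hrv⟩ := List.mem_iff_getElem.mp hmem
        refine ⟨PySem.Int.mod ((r : Int) - start) (occ.length), ?_, ?_⟩
        · rw [PySem.List.mem_pyRange_one]
          have := PySem.Int.mod_nonneg ((r : Int) - start) hN
          have := PySem.Int.mod_lt ((r : Int) - start) hN
          omega
        · rw [hbadsimp]
          have hmm : PySem.Int.mod (start + PySem.Int.mod ((r : Int) - start) (occ.length)) (occ.length) = (r : Int) := by
            rw [PySem.Int.mod_eq_emod_of_pos hN, PySem.Int.mod_eq_emod_of_pos hN]
            rw [Int.add_emod, Int.emod_emod_of_dvd _ dvd_rfl, ← Int.add_emod]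
            have : start + ((r:Int) - start) = (r:Int) := by ring
            rw [this]
            exact Int.emod_eq_of_lt (by omega) (by omega)
          rw [hmm, hget _ (by omega) (by omega)]
          simpa using hrv
    · -- width < N
      push_neg at hWN
      rw [if_neg (show ¬ width ≥ (occ.length : Int) by omega)]
      by_cases hsm : start + width ≤ (occ.length : Int)
      · -- no wraparound for this start
        rw [if_pos hsm]
        rw [pvB_get_prefix occ (start + width) (by omega) (by omega),
            pvB_get_prefix occ start (by omega) (by omega)]
        have hcast : ((((occ.take (start + width).toNat).count true : Nat) : Int)
              = (((occ.take start.toNat).count true : Nat) : Int))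
            ↔ ((occ.take (start + width).toNat).count true = (occ.take start.toNat).count true) :=
          Int.natCast_inj
        constructor
        · rintro ⟨d, hdmem, hbad⟩
          rw [PySem.List.mem_pyRange_one] at hdmem
          rw [hbadsimp] at hbad
          have hin : 0 ≤ start + d ∧ start + d < (occ.length : Int) := ⟨by omega, by omega⟩
          rw [hmod_id _ hin.1 hin.2, hget _ hin.1 hin.2] at hbad
          simp only [decide_eq_false_iff_not]
          rw [hcast, pvSeg_ne_iff occ start.toNat (start + width).toNat (by omega) (by omega)]
          exact ⟨(start + d).toNat, by omega, by omega, by omega, hbad⟩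
        · intro hvf
          simp only [decide_eq_false_iff_not] at hvf
          rw [hcast, pvSeg_ne_iff occ start.toNat (start + width).toNat (by omega) (by omega)] at hvf
          obtain ⟨k, hk1, hk2, hk3, hkv⟩ := hvf
          refine ⟨(k : Int) - start, ?_, ?_⟩
          · rw [PySem.List.mem_pyRange_one]; omega
          · rw [hbadsimp]
            rw [hmod_id _ (by omega) (by omega), hget _ (by omega) (by omega)]
            simp [hkv]
      · -- wraparound: two segments [start, N) and [0, start+width-N)
        push_neg at hsm
        rw [if_neg (by omega)]
        rw [pvB_get_prefix occ (occ.length) (by omega) (by omega),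
            pvB_get_prefix occ start (by omega) (by omega),
            pvB_get_prefix occ (start + width - (occ.length : Int)) (by omega) (by omega)]
        have htk : occ.take ((occ.length : Int)).toNat = occ := by simp
        rw [htk]
        set e : Nat := (start + width - (occ.length : Int)).toNat with he
        have hmono : (occ.take start.toNat).count true ≤ occ.count true :=
          List.Sublist.count_le true (List.take_sublist _ _)
        have hsplitRHS :
            (¬ (((occ.count true : Nat) : Int) - (((occ.take start.toNat).count true : Nat) : Int)
                + (((occ.take e).count true : Nat) : Int) = 0))
            ↔ (¬ ((occ.take occ.length).count true = (occ.take start.toNat).count true))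
              ∨ (¬ ((occ.take e).count true = (occ.take 0).count true)) := by
          simp only [List.take_length, List.take_zero, List.count_nil]
          omega
        constructor
        · rintro ⟨d, hdmem, hbad⟩
          rw [PySem.List.mem_pyRange_one] at hdmem
          rw [hbadsimp] at hbad
          simp only [decide_eq_false_iff_not]
          intro hzero
          have hor : (¬ ((occ.take occ.length).count true = (occ.take start.toNat).count true))
              ∨ (¬ ((occ.take e).count true = (occ.take 0).count true)) := by
            by_cases hc : start + d < (occ.length : Int)
            · left
              rw [pvSeg_ne_iff occ start.toNat occ.length (by omega) (by omega)]
              rw [hmod_id _ (by omega) hc, hget _ (by omega) hc] at hbad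
              exact ⟨(start + d).toNat, by omega, by omega, by omega, hbad⟩
            · right
              rw [pvSeg_ne_iff occ 0 e (by omega) (by omega)]
              rw [hmod_wrap _ (by omega) (by omega),
                  hget _ (by omega) (by omega)] at hbad
              exact ⟨(start + d - (occ.length : Int)).toNat, by omega, by omega, by omega, hbad⟩
          exact (hsplitRHS.mpr hor) hzero
        · intro hvf
          simp only [decide_eq_false_iff_not] at hvf
          rcases hsplitRHS.mp hvf with h' | h'
          · rw [pvSeg_ne_iff occ start.toNat occ.length (by omega) (by omega)] at h'
            obtain ⟨k, hk1, hk2, hk3, hkv⟩ := h'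
            refine ⟨(k : Int) - start, ?_, ?_⟩
            · rw [PySem.List.mem_pyRange_one]; omega
            · rw [hbadsimp]
              rw [hmod_id _ (by omega) (by omega), hget _ (by omega) (by omega)]
              simp [hkv]
          · rw [pvSeg_ne_iff occ 0 e (by omega) (by omega)] at h'
            obtain ⟨k, hk1, hk2, hk3, hkv⟩ := h'
            refine ⟨(k : Int) + (occ.length : Int) - start, ?_, ?_⟩
            · rw [PySem.List.mem_pyRange_one]; omega
            · rw [hbadsimp]
              rw [show start + ((k:Int) + (occ.length : Int) - start) = (k:Int) + (occ.length:Int) by ring]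
              rw [hmod_wrap _ (by omega) (by omega), hget _ (by omega) (by omega)]
              simp [hkv]


lemma pvLoop_eq (occ : List Bool) (per : Bool) (i width : Int) (js : List Int) :
    pvA_jLoop (occ.length) i width occ per js
      = pvB_jLoop (occ.length) i width (pvB_prefix occ) per js := by
  induction js with
  | nil => rfl
  | cons j rest ih =>
    have e1 : i + (-1) * j = i - j := by ring
    have e2 : i + 1 * j = i + j := by ring
    simp only [pvA_jLoop, pvB_jLoop]
    by_cases hL : 0 ≤ i - j ∧ i - j < (occ.length : Int)
    · by_cases hv : pvB_vacant (occ.length) width (pvB_prefix occ) per (i - j) = true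
      · have hs : pvA_sLoop (occ.length) i width occ per j = (false, -1) := by
          simp only [pvA_sLoop]
          rw [e1, e2, if_neg (show ¬ (i - j < 0 ∨ i - j ≥ (occ.length : Int)) by omega)]
          rw [pvCore occ per width (i - j) hL.1 hL.2, hv]
          simp
        rw [hs, if_neg (show ¬ (((false, (-1 : Int)).1) = true) by norm_num),
            if_pos ⟨hL.1, hL.2, hv⟩]
        show i + (-1) * j = i - j
        ring
      · have hv' : pvB_vacant (occ.length) width (pvB_prefix occ) per (i - j) = false :=
          Bool.eq_false_iff.mpr hv
        have hnv1 : ¬ (0 ≤ i - j ∧ i - j < (occ.length : Int)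
            ∧ pvB_vacant (occ.length) width (pvB_prefix occ) per (i - j) = true) :=
          fun h => hv h.2.2
        by_cases hR : 0 ≤ i + j ∧ i + j < (occ.length : Int)
        · by_cases hu : pvB_vacant (occ.length) width (pvB_prefix occ) per (i + j) = true
          · have hs : pvA_sLoop (occ.length) i width occ per j = (false, 1) := by
              simp only [pvA_sLoop]
              rw [e1, e2, if_neg (show ¬ (i - j < 0 ∨ i - j ≥ (occ.length : Int)) by omega)]
              rw [pvCore occ per width (i - j) hL.1 hL.2, hv',
                  if_neg (show ¬ ((!false) = false) by norm_num),
                  if_neg (show ¬ (i + j < 0 ∨ i + j ≥ (occ.length : Int)) by omega),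
                  pvCore occ per width (i + j) hR.1 hR.2, hu]
              simp
            rw [hs, if_neg (show ¬ (((false, (1 : Int)).1) = true) by norm_num),
                if_neg hnv1, if_pos ⟨hR.1, hR.2, hu⟩]
            show i + 1 * j = i + j
            ring
          · have hu' : pvB_vacant (occ.length) width (pvB_prefix occ) per (i + j) = false :=
              Bool.eq_false_iff.mpr hu
            have hs : pvA_sLoop (occ.length) i width occ per j = (true, 1) := by
              simp only [pvA_sLoop]
              rw [e1, e2, if_neg (show ¬ (i - j < 0 ∨ i - j ≥ (occ.length : Int)) by omega)]
              rw [pvCore occ per width (i - j) hL.1 hL.2, hv',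
                  if_neg (show ¬ ((!false) = false) by norm_num),
                  if_neg (show ¬ (i + j < 0 ∨ i + j ≥ (occ.length : Int)) by omega),
                  pvCore occ per width (i + j) hR.1 hR.2, hu']
              simp
            rw [hs, if_pos (show (((true, (1 : Int)).1) = true) by norm_num),
                if_neg hnv1, if_neg (fun h => hu h.2.2)]
            exact ih
        · have hs : pvA_sLoop (occ.length) i width occ per j = (true, 1) := by
            simp only [pvA_sLoop]
            rw [e1, e2, if_neg (show ¬ (i - j < 0 ∨ i - j ≥ (occ.length : Int)) by omega)]
            rw [pvCore occ per width (i - j) hL.1 hL.2, hv',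
                if_neg (show ¬ ((!false) = false) by norm_num),
                if_pos (show (i + j < 0 ∨ i + j ≥ (occ.length : Int)) by omega)]
          rw [hs, if_pos (show (((true, (1 : Int)).1) = true) by norm_num),
              if_neg hnv1, if_neg (fun h => hR ⟨h.1, h.2.1⟩)]
          exact ih
    · have hnv1 : ¬ (0 ≤ i - j ∧ i - j < (occ.length : Int)
          ∧ pvB_vacant (occ.length) width (pvB_prefix occ) per (i - j) = true) :=
        fun h => hL ⟨h.1, h.2.1⟩
      by_cases hR : 0 ≤ i + j ∧ i + j < (occ.length : Int)
      · by_cases hu : pvB_vacant (occ.length) width (pvB_prefix occ) per (i + j) = true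
        · have hs : pvA_sLoop (occ.length) i width occ per j = (false, 1) := by
            simp only [pvA_sLoop]
            rw [e1, e2, if_pos (show (i - j < 0 ∨ i - j ≥ (occ.length : Int)) by omega)]
            rw [if_neg (show ¬ (i + j < 0 ∨ i + j ≥ (occ.length : Int)) by omega),
                pvCore occ per width (i + j) hR.1 hR.2, hu]
            simp
          rw [hs, if_neg (show ¬ (((false, (1 : Int)).1) = true) by norm_num),
              if_neg hnv1, if_pos ⟨hR.1, hR.2, hu⟩]
          show i + 1 * j = i + j
          ring
        · have hu' : pvB_vacant (occ.length) width (pvB_prefix occ) per (i + j) = false :=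
            Bool.eq_false_iff.mpr hu
          have hs : pvA_sLoop (occ.length) i width occ per j = (true, 1) := by
            simp only [pvA_sLoop]
            rw [e1, e2, if_pos (show (i - j < 0 ∨ i - j ≥ (occ.length : Int)) by omega)]
            rw [if_neg (show ¬ (i + j < 0 ∨ i + j ≥ (occ.length : Int)) by omega),
                pvCore occ per width (i + j) hR.1 hR.2, hu']
            simp
          rw [hs, if_pos (show (((true, (1 : Int)).1) = true) by norm_num),
              if_neg hnv1, if_neg (fun h => hu h.2.2)]
          exact ih
      · have hs : pvA_sLoop (occ.length) i width occ per j = (true, 1) := by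
          simp only [pvA_sLoop]
          rw [e1, e2, if_pos (show (i - j < 0 ∨ i - j ≥ (occ.length : Int)) by omega)]
          rw [if_pos (show (i + j < 0 ∨ i + j ≥ (occ.length : Int)) by omega)]
        rw [hs, if_pos (show (((true, (1 : Int)).1) = true) by norm_num),
            if_neg hnv1, if_neg (fun h => hR ⟨h.1, h.2.1⟩)]
        exact ih


-- ===== VERDICT (by name: the statement is the Claim_ definition above) =====
theorem FindNearestAvailableSite_spec : Claim_equal_FindNearestAvailableSite := by
  intro i width occ per _
  unfold Spec_FindNearestAvailableSite FindNearestAvailableSite FindNearestAvailableSite_alt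
  have hj : (-width + (occ.length : Int) - i) = ((occ.length : Int) - width - i) := by ring
  simp only [hj]
  exact pvLoop_eq occ per i width _
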